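-- pv_equiv track=rewrite | github.com/Cronenbrogues/cronenbroguelike | tests/unit/engine/say.py | _sifted_edits
-- ===== SOURCE A (Python) =====
-- def _to_generator(string):
--     for character in string:
--         yield character
--
-- def _sifted_edits(original, augmented):
--     """Reconstructs original from augmented by removing characters.
--
--     If original is a disjoint substring of augmented (i.e., if a series of
--     addition edits/interpolations can get from original to augmented), this
--     method returns the tuple (original, edits).
--
--     Otherwise, this method will return the longest left substring that can be
--     so reconstructed and all edits encountered up to that point. In either case,
--     the returned values will be strings.
--
--     This is equivalent to assessing that the edit distance between the two
--     strings consists only in a series of additions (not removals or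
--     substitutions).
--     """
--     reconstructed = []
--     edits = []
--
--     aug_gen = _to_generator(augmented)
--
--     for oc in original:
--         while True:
--             try:
--                 next_aug = next(aug_gen)
--             except StopIteration:
--                 break
--             if oc == next_aug:
--                 reconstructed.append(next_aug)
--                 break
--             else:
--                 edits.append(next_aug)
--
--     # Captures any remaining characters.
--     edits.extend(aug_gen)
--     return ''.join(reconstructed), ''.join(edits)
-- ===== SOURCE B (Python) =====
-- def _sifted_edits(original, augmented):
--     """Single flat pass over augmented with an index into original."""
--     reconstructed = []
--     edits = []
--     i = 0
--     for ac in augmented: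
--         if i < len(original) and ac == original[i]:
--             reconstructed.append(ac)
--             i += 1
--         else:
--             edits.append(ac)
--     return ''.join(reconstructed), ''.join(edits)
-- ===== Notes on version B (the rewrite author's own statement) =====
-- stated objective: simpler
-- what changed: Replaces the generator plus nested while-loop (outer loop over original, inner loop consuming the generator, separate trailing flush) by one flat loop over augmented with an index into original; the remainder handling disappears and the generator/StopIteration overhead is removed.
import Mathlib
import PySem

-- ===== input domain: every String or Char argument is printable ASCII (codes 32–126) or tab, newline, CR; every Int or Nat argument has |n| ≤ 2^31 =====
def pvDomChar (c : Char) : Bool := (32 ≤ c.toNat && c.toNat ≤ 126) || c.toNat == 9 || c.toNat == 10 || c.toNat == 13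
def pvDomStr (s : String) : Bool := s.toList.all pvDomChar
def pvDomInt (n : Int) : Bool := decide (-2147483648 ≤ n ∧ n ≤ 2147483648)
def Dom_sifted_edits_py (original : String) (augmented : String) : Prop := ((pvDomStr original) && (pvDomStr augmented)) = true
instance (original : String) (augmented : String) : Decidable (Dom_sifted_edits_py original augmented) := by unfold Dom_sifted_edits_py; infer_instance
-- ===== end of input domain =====

-- B replaces A's generator + nested while (driven by original, with a trailing flush)
-- by one flat pass over augmented with an index into original; objective: simpler.

-- ===== PORT A =====
-- inner 'while True' loop: consume the generator (remaining list) until a char equal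
-- to oc is found; returns (remaining generator, edits collected, whether oc matched)
def pvConsumeA (oc : Char) : List Char → List Char × List Char × Bool
  | [] => ([], [], false)
  | a :: rest =>
      if oc == a then (rest, [], true)
      else
        let (r, e, m) := pvConsumeA oc rest
        (r, a :: e, m)

-- outer 'for oc in original' loop; on exhaustion of original, 'edits.extend(aug_gen)'
def pvOuterA : List Char → List Char → List Char × List Char
  | [], aug => ([], aug)
  | oc :: os, aug =>
      let (r, e, m) := pvConsumeA oc aug
      let (rec', ed') := pvOuterA os r
      ((if m then oc :: rec' else rec'), e ++ ed')

def sifted_edits_py (original : String) (augmented : String) : String × String :=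
  let (rec', ed') := pvOuterA original.toList augmented.toList
  (String.ofList rec', String.ofList ed')

-- ===== PORT B =====
-- one pass over augmented; first list argument is the not-yet-matched suffix of original
def pvScanB : List Char → List Char → List Char × List Char
  | _, [] => ([], [])
  | [], ac :: rest =>
      let (r, e) := pvScanB [] rest
      (r, ac :: e)
  | oc :: os, ac :: rest =>
      if ac == oc then
        let (r, e) := pvScanB os rest
        (ac :: r, e)
      else
        let (r, e) := pvScanB (oc :: os) rest
        (r, ac :: e)

def sifted_edits_py_alt (original : String) (augmented : String) : String × String :=
  let (r, e) := pvScanB original.toList augmented.toList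
  (String.ofList r, String.ofList e)

-- ===== PRECONDITION & SPEC =====
def Spec_sifted_edits_py (original : String) (augmented : String) (out : String × String) : Prop := out = sifted_edits_py_alt original augmented
instance (original : String) (augmented : String) (out : String × String) : Decidable (Spec_sifted_edits_py original augmented out) := by unfold Spec_sifted_edits_py; infer_instance

-- ===== CLAIM (what is proved, stated in full; the proofs are below) =====
def Claim_equal_sifted_edits_py : Prop := ∀ (original : String) (augmented : String), Dom_sifted_edits_py original augmented → Spec_sifted_edits_py original augmented (sifted_edits_py original augmented)

-- ===== LEMMAS AND PROOFS =====

theorem pvOuterA_nil_aug : ∀ orig : List Char, pvOuterA orig [] = ([], []) := by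
  intro orig
  induction orig with
  | nil => rfl
  | cons oc os ih => simp [pvOuterA, pvConsumeA, ih]

theorem pvScanB_nil_orig : ∀ aug : List Char, pvScanB [] aug = ([], aug) := by
  intro aug
  induction aug with
  | nil => rfl
  | cons ac rest ih => simp [pvScanB, ih]

theorem pvOuterA_eq_pvScanB : ∀ (aug orig : List Char), pvOuterA orig aug = pvScanB orig aug := by
  intro aug
  induction aug with
  | nil =>
      intro orig
      cases orig with
      | nil => rfl
      | cons oc os => simp [pvOuterA_nil_aug, pvScanB]
  | cons ac rest ih =>
      intro orig
      cases orig with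
      | nil => simp [pvOuterA, pvScanB_nil_orig]
      | cons oc os =>
          by_cases h : oc = ac
          · subst h
            simp [pvOuterA, pvConsumeA, pvScanB, ih]
          · have hb : (oc == ac) = false := by simp [h]
            have hb' : (ac == oc) = false := by simp [Ne.symm h]
            rcases hc : pvConsumeA oc rest with ⟨r, e, m⟩
            rcases ho : pvOuterA os r with ⟨rec', ed'⟩
            have heq := ih (oc :: os)
            simp only [pvOuterA, hc, ho] at heq
            simp only [pvOuterA, pvConsumeA, pvScanB, hb, hb', Bool.false_eq_true,
              if_false, hc, ho, ← heq, List.cons_append]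

theorem sifted_edits_py_spec : Claim_equal_sifted_edits_py := by
  intro original augmented _
  unfold Spec_sifted_edits_py sifted_edits_py sifted_edits_py_alt
  rw [pvOuterA_eq_pvScanB]
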